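-- pv_equiv track=rewrite | github.com/learnwithjuni/Python-Level-3 | AM-Check-in-1/main.py | makeWord
-- ===== SOURCE A (Python) =====
-- def makeWord(keystrokes):
--   stack = []
--   # loop through the keystrokes
--   for key in keystrokes:
--     if key != "#": # if the key is not a backspace, add it to the word
--       stack.append(key)
--     elif len(stack) > 0: # if the key is a backspace and stack isn't empty, pop the last letter
--       stack.pop()
--   # turn the stack into a string
--   word = ""
--   for letter in stack:
--     word += letter
--   return word
-- ===== SOURCE B (Python) =====
-- def makeWord(keystrokes):
--   # Reverse scan with a skip counter instead of a stack.
--   kept = []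
--   skip = 0
--   for key in reversed(keystrokes):
--     if key == "#":
--       skip += 1
--     elif skip > 0:
--       skip -= 1
--     else:
--       kept.append(key)
--   return "".join(reversed(kept))
-- ===== Notes on version B (the rewrite author's own statement) =====
-- stated objective: alternative
-- what changed: Replaces the forward stack-with-pop pass plus string-accumulation loop by a single reverse scan keeping an integer skip counter for pending backspaces, then joins the kept keys reversed.
import Mathlib
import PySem

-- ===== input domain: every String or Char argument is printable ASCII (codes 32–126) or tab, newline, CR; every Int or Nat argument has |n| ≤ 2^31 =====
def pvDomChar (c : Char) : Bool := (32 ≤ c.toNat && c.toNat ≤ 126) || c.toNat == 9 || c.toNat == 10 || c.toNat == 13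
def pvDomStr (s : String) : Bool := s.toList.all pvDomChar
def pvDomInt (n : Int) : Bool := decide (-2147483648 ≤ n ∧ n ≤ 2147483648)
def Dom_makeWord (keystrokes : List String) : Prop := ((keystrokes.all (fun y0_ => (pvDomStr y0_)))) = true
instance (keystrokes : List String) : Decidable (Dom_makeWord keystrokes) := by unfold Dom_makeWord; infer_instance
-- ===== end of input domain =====

-- B replaces A's forward stack-with-pop pass by a reverse scan with a skip counter; alternative decomposition, same cost.

-- ===== PORT A =====
-- literal port: build the stack left to right (append / conditional pop), then fold the stack into a string
def makeWord (keystrokes : List String) : String :=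
  let stack := keystrokes.foldl
    (fun stack key =>
      if key ≠ "#" then stack ++ [key]
      else if stack.length > 0 then stack.dropLast
      else stack) []
  stack.foldl (fun word letter => word ++ letter) ""

-- ===== PORT B =====
-- scan the reversed keystrokes: '#' increments skip, skip > 0 drops the key, otherwise keep it
def makeWordScan : List String → Nat → List String
  | [], _ => []
  | key :: rest, skip =>
    if key == "#" then makeWordScan rest (skip + 1)
    else if skip > 0 then makeWordScan rest (skip - 1)
    else key :: makeWordScan rest skip

def makeWord_alt (keystrokes : List String) : String :=
  PySem.Str.join "" (makeWordScan keystrokes.reverse 0).reverse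

-- ===== PRECONDITION & SPEC =====
def Spec_makeWord (keystrokes : List String) (out : String) : Prop := out = makeWord_alt keystrokes
instance (keystrokes : List String) (out : String) : Decidable (Spec_makeWord keystrokes out) := by unfold Spec_makeWord; infer_instance

-- ===== CLAIM (what is proved, stated in full; the proofs are below) =====
def Claim_equal_makeWord : Prop := ∀ (keystrokes : List String), Dom_makeWord keystrokes → Spec_makeWord keystrokes (makeWord keystrokes)

-- ===== LEMMAS AND PROOFS =====

-- A's stack-building step
def mwStep (stack : List String) (key : String) : List String :=
  if key ≠ "#" then stack ++ [key]
  else if stack.length > 0 then stack.dropLast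
  else stack

theorem mwStep_hash (stack : List String) : mwStep stack "#" = stack.dropLast := by
  cases stack <;> simp [mwStep]

theorem flatten_intersperse_nil {α : Type} (l : List (List α)) :
    (List.intersperse ([] : List α) l).flatten = l.flatten := by
  match l with
  | [] => rfl
  | [a] => rfl
  | a :: b :: t =>
    simp only [List.intersperse, List.flatten_cons, flatten_intersperse_nil (b :: t)]
    simp

theorem join_nil_cons (x : String) (l : List String) :
    PySem.Str.join "" (x :: l) = x ++ PySem.Str.join "" l := by
  rw [← String.toList_inj]
  simp [PySem.Str.join, PySem.Chars.join, List.intercalate, flatten_intersperse_nil]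

theorem foldl_append_eq_join (l : List String) :
    List.foldl (fun word letter => word ++ letter) "" l = PySem.Str.join "" l := by
  suffices h : ∀ (w : String), List.foldl (fun word letter => word ++ letter) w l
      = w ++ PySem.Str.join "" l by
    simpa using h ""
  induction l with
  | nil =>
    intro w
    rw [← String.toList_inj]
    simp [PySem.Str.join, PySem.Chars.join, List.intercalate]
  | cons x t ih =>
    intro w
    simp only [List.foldl_cons, ih, join_nil_cons, String.append_assoc]

-- the reverse scan computes exactly A's stack, up to `skip` dropped trailing elements
theorem makeWordScan_eq_take (ys : List String) (skip : Nat) :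
    (makeWordScan ys skip).reverse
      = (ys.reverse.foldl mwStep []).take ((ys.reverse.foldl mwStep []).length - skip) := by
  induction ys generalizing skip with
  | nil => simp [makeWordScan]
  | cons key rest ih =>
    have hfold : (key :: rest).reverse.foldl mwStep [] = mwStep (rest.reverse.foldl mwStep []) key := by
      simp [List.foldl_append]
    set l := rest.reverse.foldl mwStep [] with hl
    by_cases hk : key = "#"
    · subst hk
      rw [show makeWordScan ("#" :: rest) skip = makeWordScan rest (skip + 1) from by
        simp [makeWordScan]]
      rw [ih (skip + 1), hfold, mwStep_hash, List.dropLast_eq_take, List.take_take, List.length_take]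
      congr 1
      omega
    · rw [show makeWordScan (key :: rest) skip
          = if skip > 0 then makeWordScan rest (skip - 1) else key :: makeWordScan rest skip from by
        simp [makeWordScan, hk]]
      have hstep : mwStep l key = l ++ [key] := by simp [mwStep, hk]
      rw [hfold, hstep]
      by_cases hs : skip > 0
      · rw [if_pos hs, ih (skip - 1)]
        rw [List.take_append_of_le_length (by simp; omega)]
        congr 1
        simp
        omega
      · rw [if_neg hs]
        have hs0 : skip = 0 := by omega
        subst hs0
        simp [ih 0]

-- ===== VERDICT (by name: the statement is the Claim_ definition above) =====
theorem makeWord_spec : Claim_equal_makeWord := by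
  intro keystrokes _
  unfold Spec_makeWord makeWord makeWord_alt
  have h := makeWordScan_eq_take keystrokes.reverse 0
  simp only [List.reverse_reverse, Nat.sub_zero, List.take_length] at h
  rw [h]
  have : keystrokes.foldl
      (fun stack key =>
        if key ≠ "#" then stack ++ [key]
        else if stack.length > 0 then stack.dropLast
        else stack) []
      = keystrokes.foldl mwStep [] := rfl
  rw [this]
  exact foldl_append_eq_join _
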